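-- pv_equiv track=rewrite | github.com/hublecarpio/Api_whatsapp_instancias | agent-v2/src/schemas/tool_schemas.py | _contains_blocked_info
-- ===== SOURCE A (Python) =====
-- def _contains_blocked_info(text: str) -> bool:
--     """Detecta si un texto contiene información técnica bloqueada."""
--     blocked_patterns = [
--         "traceback", "stacktrace", "at line",
--         "internal server error", "database error",
--         "api_key=", "token=", "secret=",
--         "password=", "auth=",
--         "record_id=", "document_id="
--     ]
--     text_lower = text.lower()
--     return any(pattern in text_lower for pattern in blocked_patterns)
-- ===== SOURCE B (Python) =====
-- def _contains_blocked_info(text: str) -> bool: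
--     """Detecta si un texto contiene información técnica bloqueada."""
--     blocked_patterns = [
--         "traceback", "stacktrace", "at line",
--         "internal server error", "database error",
--         "api_key=", "token=", "secret=",
--         "password=", "auth=",
--         "record_id=", "document_id="
--     ]
--     text_lower = text.lower()
--     return any(
--         any(text_lower.startswith(p, i) for p in blocked_patterns)
--         for i in range(len(text_lower))
--     )
-- ===== Notes on version B (the rewrite author's own statement) =====
-- stated objective: alternative
-- what changed: Replaces the per-pattern substring-search loop (one full scan of the text per pattern) by a single left-to-right scan over text positions that tests at each position whether any pattern starts there, like a naive multi-pattern matcher.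
import Mathlib
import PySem

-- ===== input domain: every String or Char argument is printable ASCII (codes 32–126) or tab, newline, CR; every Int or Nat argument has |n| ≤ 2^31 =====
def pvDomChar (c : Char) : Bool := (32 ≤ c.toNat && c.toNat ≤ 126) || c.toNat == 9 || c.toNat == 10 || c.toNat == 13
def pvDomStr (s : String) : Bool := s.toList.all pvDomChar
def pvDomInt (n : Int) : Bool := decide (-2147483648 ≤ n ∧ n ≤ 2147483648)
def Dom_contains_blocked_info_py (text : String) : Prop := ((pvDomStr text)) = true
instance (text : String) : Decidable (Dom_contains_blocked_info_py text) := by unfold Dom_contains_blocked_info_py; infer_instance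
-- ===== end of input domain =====

-- B replaces the per-pattern substring-membership loop by a single left-to-right scan over
-- text positions, testing at each position whether any pattern starts there (objective: alternative).

def pvBlockedPatterns : List String :=
  ["traceback", "stacktrace", "at line",
   "internal server error", "database error",
   "api_key=", "token=", "secret=",
   "password=", "auth=",
   "record_id=", "document_id="]

-- ===== PORT A =====
def contains_blocked_info_py (text : String) : Bool :=
  let text_lower := PySem.Str.lower text
  pvBlockedPatterns.any (fun pattern => PySem.Str.isIn pattern text_lower)

-- ===== PORT B =====
-- one pass over the positions of the text: at each suffix, does some pattern start here?
def pvAltScan (pats : List (List Char)) : List Char → Bool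
  | [] => false
  | c :: rest => pats.any (fun p => p.isPrefixOf (c :: rest)) || pvAltScan pats rest

def contains_blocked_info_py_alt (text : String) : Bool :=
  let text_lower := PySem.Str.lower text
  pvAltScan (pvBlockedPatterns.map String.toList) text_lower.toList

-- ===== PRECONDITION & SPEC =====
def Spec_contains_blocked_info_py (text : String) (out : Bool) : Prop := out = contains_blocked_info_py_alt text
instance (text : String) (out : Bool) : Decidable (Spec_contains_blocked_info_py text out) := by unfold Spec_contains_blocked_info_py; infer_instance

-- ===== CLAIM (what is proved, stated in full; the proofs are below) =====
def Claim_equal_contains_blocked_info_py : Prop := ∀ (text : String), Dom_contains_blocked_info_py text → Spec_contains_blocked_info_py text (contains_blocked_info_py text)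

-- ===== LEMMAS AND PROOFS =====

theorem pvChars_isIn_eq_decide (sub s : List Char) :
    PySem.Chars.isIn sub s = decide (sub <:+: s) := by
  by_cases h : sub <:+: s
  · exact (PySem.Chars.isIn_iff_infix sub s).mpr h ▸ by simp [h]
  · exact (PySem.Chars.isIn_eq_false_iff sub s).mpr h ▸ by simp [h]

theorem pvAltScan_eq_any (pats : List (List Char)) (l : List Char)
    (hne : ∀ p ∈ pats, p ≠ []) :
    pvAltScan pats l = pats.any (fun p => decide (p <:+: l)) := by
  induction l with
  | nil =>
    symm
    simp only [pvAltScan, List.any_eq_false, decide_eq_true_eq]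
    intro p hp
    simp only [List.infix_nil]
    exact hne p hp
  | cons c rest ih =>
    rw [pvAltScan, ih]
    refine Bool.eq_iff_iff.mpr ?_
    simp only [Bool.or_eq_true, List.any_eq_true,
      List.isPrefixOf_iff_prefix, decide_eq_true_eq, List.infix_cons_iff]
    constructor
    · rintro (⟨p, hp, h⟩ | ⟨p, hp, h⟩)
      · exact ⟨p, hp, Or.inl h⟩
      · exact ⟨p, hp, Or.inr h⟩
    · rintro ⟨p, hp, h | h⟩
      · exact Or.inl ⟨p, hp, h⟩
      · exact Or.inr ⟨p, hp, h⟩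

-- ===== VERDICT (by name: the statement is the Claim_ definition above) =====
theorem contains_blocked_info_py_spec : Claim_equal_contains_blocked_info_py := by
  intro text _
  unfold Spec_contains_blocked_info_py contains_blocked_info_py contains_blocked_info_py_alt
  rw [pvAltScan_eq_any _ _ (by decide)]
  simp [List.any_map, Function.comp_def, pvChars_isIn_eq_decide]
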